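/- GENERATED by tools/from_farm_form.py from prooffarm-gif/accepted/DGifGetLine.3/Lemmas.lean (a worked proof of the farm's unit `DGifGetLine.3`,
   accepted by the verdict) — do not edit. -/
import Gif.Spec.Units.DGifGetLine_3
import Gif.Spec.AllSegs

/-!
  Lemmas for the unit `DGifGetLine.3` (one round of the flush loop of `DGifGetLine`, dgif_lib.c:511-516; a BODY segment of a protected
  function with a contract call into the frame's own object `Dummy`). The segment is walked in TWO STEPS that meet at the call's
  return address 0x10a2f7 (`ret9`), with a private assertion there.

      gl3_AtRet9       the assertion at `ret9`: `Body` + what is live THERE (`r13d = 1`, `eax` 0 or 1, the measure went down on 1)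
      gl3_seg_call     0x10a2ea … the call of DGifGetCodeNext … 0x10a2f7: `Head m` → `gl3_AtRet9 m`
      gl3_seg_tail     0x10a2f7 … 0x10a2ea (back edge) | 0x10a28e (both exits): `gl3_AtRet9 m` → `Head m'`, `m' < m`, or `Done`

  The general lemmas are those of Gif/Spec/FrameCarry.lean §5 (`Env.at_call`) and Gif/Spec/Carry.lean §1, §4 (`LZOK.sameExcept`,
  `OutPtr.own`).
-/

open X86 X86.User Asan ProgX.Base ProgX.Base.Spec Gif.Spec

set_option maxRecDepth 4000
set_option maxHeartbeats 4000000

namespace Gif.Spec.DGifGetLine_3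

/-- **At 10A2F7H (ret9), `DGifGetCodeNext(gif, &Dummy)` has returned**: `Body`, `r13d = GIF_OK` still, `eax` is 1 or 0, and on 1 the
reader advanced by at least one byte of the `m` that were left at the head. -/
structure gl3_AtRet9 (m : Nat) (H : Heap) (rest : List Obj) (frames : List (Nat × FrameLayout)) (F : Forest) (R : Rd) (n : Nat)
    (u₀ e : State) (ret : Word) (v : State) : Prop where
  body : DGifGetLine.Body Gif.L.DGifGetLine.ret9 H rest frames F R n u₀ e ret v
  r13 : (v.reg .r13).toNat % 2 ^ 32 = 1
  res : (v.reg .rax).toNat = 1 ∨ (v.reg .rax).toNat = 0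
  adv : (v.reg .rax).toNat = 1 → Gif.Spec.rem R v.mem + 1 ≤ m

/-- **10A2EAH … the call of DGifGetCodeNext … 10A2F7H (ret9)** (dgif_lib.c:512 `DGifGetCodeNext(GifFile, &Dummy)`).
`rsi = &Dummy = RA − 88` (the frame's object `Dummy` at base + 32), `rdi = rbp = gif`. -/
theorem gl3_seg_call (Lay : Layout) (hLay : Lay.hi = 0x1000000) (μ : Microarch) (hμ : UserX.MicroOK μ) (u₀ : State)
    (hcode : HasCodeNat Lay u₀ Gif.L.DGifGetLine.entry Gif.Code.code_DGifGetLine.nat Gif.L.DGifGetLine.size)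
    (H : Heap) (rest : List Obj) (frames : List (Nat × FrameLayout)) (F : Forest) (R : Rd) (n : Nat) (e : State) (ret : Word)
    (m : Nat)
    (h_DGifGetCodeNext : Calls Lay μ ProgX.Base.WayInv (ProgX.Base.conv u₀) Gif.L.DGifGetCodeNext.entry
      (Gif.Spec.DGifGetCodeNext.spec H rest (DGifGetLine.framesIn frames e) F R))
    (v : State) (hat : DGifGetLine.Head m H rest frames F R n u₀ e ret v) :
    ReachVia Lay μ ProgX.Base.WayInv v (gl3_AtRet9 m H rest frames F R n u₀ e ret) := by
  -- THE PRELUDE: the entry assertion `Head` = `Body` + `r13d = 1` + the measure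
  obtain ⟨hbody, hr13, hmeasure⟩ := hat
  have he := hbody.entry
  v_entry he
  obtain ⟨henv, hlz0, hrdi, hrdx, hn1, hn31, hbuf0, hfar0⟩ := hbody.pre
  -- what the walker reads of a segment's entry state: rip, rsp (as `c_rsp`), the registers kept, the text, DF / MXCSR
  have w_rip := hbody.rip
  have c_rsp : v.reg .rsp = e.reg .rsp - 120 := hbody.rsp
  have c_rbp : v.reg .rbp = e.reg .rdi := hbody.rbp
  have w_kept : RegsKept [.rsp] v v := RegsKept.refl _ _
  have w_eq : Mem.EqOn ProgX.Base.L.textLo ProgX.Base.L.textHi u₀.mem v.mem := ProgX.Base.conv_code_eqOn hbody.code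
  have hdf := (show abiInv _ from hbody.abi).1
  have hmx := (show abiInv _ from hbody.abi).2
  have hsse := ProgX.Base.sseOK_of_abiInv hbody.abi
  -- the slots and the footprint that `Body` at the exit states again
  have k_r15 : v.mem.readLE (e.reg .rsp - 8) 8 = (e.reg .r15).toNat := hbody.slot_r15
  have k_r14 : v.mem.readLE (e.reg .rsp - 16) 8 = (e.reg .r14).toNat := hbody.slot_r14
  have k_r13 : v.mem.readLE (e.reg .rsp - 24) 8 = (e.reg .r13).toNat := hbody.slot_r13
  have k_r12 : v.mem.readLE (e.reg .rsp - 32) 8 = (e.reg .r12).toNat := hbody.slot_r12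
  have k_rbp : v.mem.readLE (e.reg .rsp - 40) 8 = (e.reg .rbp).toNat := hbody.slot_rbp
  have k_rbx : v.mem.readLE (e.reg .rsp - 48) 8 = (e.reg .rbx).toNat := hbody.slot_rbx
  have k_ra : UInt64.ofNat (v.mem.readLE (e.reg .rsp) 8) = ret := hbody.slot_ra
  have hsame : Mem.SameExcept
    [⟨(e.reg .rsp).toNat - 688, (e.reg .rsp).toNat⟩,
     shadowSpan ((e.reg .rsp).toNat - 120) ((e.reg .rsp).toNat - 56),
     ⟨(e.reg .rsi).toNat, (e.reg .rsi).toNat + n⟩,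
     ⟨F.pv + 20, F.pv + 64⟩,
     ⟨F.pv + 88, F.pv + 344⟩,
     ⟨F.pv + 344, F.pv + 4439⟩,
     ⟨F.pv + 4439, F.pv + 8535⟩,
     ⟨F.pv + 8536, F.pv + 24920⟩,
     ⟨F.gif + 96, F.gif + 100⟩,
     ⟨R.cur, R.cur + 8⟩] e.mem v.mem := hbody.same
  -- where the cursor, gif and pv are, as numbers (`v_side`, `u_same`, `u_omega` place every store with them)
  have hcur := henv.ctx.cursor_range henv.heap.inv.shadow
  have hgin := henv.ok.owns.inside henv.heap.inv.heap (o := (F.gif, 120)) List.mem_cons_self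
  have hpin := henv.ok.owns.inside henv.heap.inv.heap (o := (F.pv, 24936)) (List.mem_cons_of_mem _ List.mem_cons_self)
  have hbase := henv.heap.base
  simp only at hgin hpin
  rw [hbase] at hgin hpin
  obtain ⟨wg1, -, -, -, wg2⟩ := hgin
  obtain ⟨wp1, -, -, -, wp2⟩ := hpin
  -- THE WALK, to the call's return address
  u_walk hcode [hμ.vendor] until [Gif.L.DGifGetLine.ret9] span [ProgX.Base.L.textLo, ProgX.Base.L.textHi] side (v_side)
  case call_inv =>
    v_inv
  case pre_10a2f2 =>
    -- DGIFGETCODENEXT'S PRECONDITION. The environment for the frame list with the own frame in front: only the return address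
    -- was pushed since `v`
    have hs : Mem.SameExcept [⟨(e.reg .rsp).toNat - 688, (e.reg .rsp).toNat - 120⟩] v.mem s_10a2f2.mem := by
      rw [w_mem]
      u_same
    have henv' : Env H rest (DGifGetLine.framesIn frames e) F R s_10a2f2 := by
      refine henv.at_call hbody.inv hbody.ok hs (by omega) (by omega) ?_ ?_ ?_
      · rw [w_rsp]
        u_omega
      · rw [w_rsp]
        u_omega
      · rw [w_rsp]
        u_omega
    -- the out-pointer is the frame's object `Dummy` (`[rsp + 0x20]` = base + 32, 8 bytes), named by its numbers
    have ho : (⟨(e.reg .rsp).toNat - 120 + 32, 8, .stack⟩ : Obj) ∈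
        Gif.Frames.DGifGetLine.objsAt ((e.reg .rsp).toNat - 120) := List.mem_cons_self
    have hsz : Gif.Frames.DGifGetLine.size = 64 := rfl
    have hb : (e.reg .rsp).toNat - 120 + Gif.Frames.DGifGetLine.size ≤ (e.reg .rsp).toNat + 8 := by
      rw [hsz]
      omega
    have ersi : (s_10a2f2.reg .rsi).toNat = (e.reg .rsp).toNat - 120 + 32 := by
      rw [w_rsi]
      u_omega
    have hout : OutPtr H rest (DGifGetLine.framesIn frames e) F R (s_10a2f2.reg .rsi).toNat 8 := by
      rw [ersi]
      exact OutPtr.own henv.heap henv.ctx hbody.inv hb ho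
    -- the three clauses: `Env`, `rdi = gif`, `OutPtr`
    refine ⟨henv', ?_, hout⟩
    rw [w_rdi]
    exact hrdi
  -- 0x10a2f7 (ret9): DGIFGETCODENEXT HAS RETURNED. Its post: `Back`, a result 0 or 1, on 1 the reader advanced
  obtain ⟨hback, hbool, hadv⟩ := w_post
  -- the reader at DGifGetCodeNext's entry is the head's: only the return address was pushed
  have hs0 : Mem.SameExcept [⟨(e.reg .rsp).toNat - 688, (e.reg .rsp).toNat - 120⟩] v.mem s_10a2f2.mem := by
    rw [w_mem_10a2f2]
    u_same
  have hrem0 : rem R s_10a2f2.mem = rem R v.mem := by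
    apply rem_sameExcept hs0 (by omega)
    intro w hw
    have ew := List.mem_singleton.mp hw
    rw [ew]
    simp only
    omega
  have e_top : (s_10a2f2.reg .rsp).toNat + 8 = (e.reg .rsp).toNat - 120 := by
    rw [w_rsp_10a2f2]
    u_omega
  -- the callee's footprint in terms of `v` (`w_same : SameExcept […] (v.mem.writeLE …) s_10a2f2r.mem`)
  v_after_call w_rsp_10a2f2 w_mem_10a2f2
  simp only [w_rsi_10a2f2] at w_same
  -- THE FOOTPRINT SINCE THE HEAD: the pushed return address and DGifGetCodeNext's windows (`Dummy` is `[RA − 88, RA − 80)`)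
  have hsV : Mem.SameExcept
    [⟨(e.reg .rsp).toNat - 688, (e.reg .rsp).toNat - 120⟩,
     ⟨(e.reg .rsp).toNat - 88, (e.reg .rsp).toNat - 80⟩,
     ⟨F.pv + 56, F.pv + 64⟩,
     ⟨F.pv + 88, F.pv + 344⟩,
     ⟨F.gif + 96, F.gif + 100⟩,
     ⟨R.cur, R.cur + 8⟩] v.mem s_10a2f2r.mem := by u_same
  -- the slots and the return address, through that footprint
  have hs15 : s_10a2f2r.mem.readLE (e.reg .rsp - 8) 8 = (e.reg .r15).toNat := by u_frame k_r15
  have hs14 : s_10a2f2r.mem.readLE (e.reg .rsp - 16) 8 = (e.reg .r14).toNat := by u_frame k_r14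
  have hs13 : s_10a2f2r.mem.readLE (e.reg .rsp - 24) 8 = (e.reg .r13).toNat := by u_frame k_r13
  have hs12 : s_10a2f2r.mem.readLE (e.reg .rsp - 32) 8 = (e.reg .r12).toNat := by u_frame k_r12
  have hsbp : s_10a2f2r.mem.readLE (e.reg .rsp - 40) 8 = (e.reg .rbp).toNat := by u_frame k_rbp
  have hsbx : s_10a2f2r.mem.readLE (e.reg .rsp - 48) 8 = (e.reg .rbx).toNat := by u_frame k_rbx
  have hsra : UInt64.ofNat (s_10a2f2r.mem.readLE (e.reg .rsp) 8) = ret := by u_frame k_ra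
  -- the footprint since the entry: the windows since the head lie inside the function's
  have hsame1 : Mem.SameExcept
    [⟨(e.reg .rsp).toNat - 688, (e.reg .rsp).toNat⟩,
     shadowSpan ((e.reg .rsp).toNat - 120) ((e.reg .rsp).toNat - 56),
     ⟨(e.reg .rsi).toNat, (e.reg .rsi).toNat + n⟩,
     ⟨F.pv + 20, F.pv + 64⟩,
     ⟨F.pv + 88, F.pv + 344⟩,
     ⟨F.pv + 344, F.pv + 4439⟩,
     ⟨F.pv + 4439, F.pv + 8535⟩,
     ⟨F.pv + 8536, F.pv + 24920⟩,
     ⟨F.gif + 96, F.gif + 100⟩,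
     ⟨R.cur, R.cur + 8⟩] e.mem s_10a2f2r.mem := by u_same
  -- the heap's invariant comes back with the clean stack at the callee's `rsp + 8` = the body's `rsp`
  have hinv1 : HeapInv H rest (DGifGetLine.framesIn frames e) ((e.reg .rsp).toNat - 120) s_10a2f2r.mem := by
    rw [← e_top]
    exact hback.inv
  -- `LZOK` is kept: no window since the head meets `[pv + 8, pv + 48)`
  have hlz1 : LZOK s_10a2f2r.mem F.pv := by
    -- gif and pv are two heap objects, 64 bytes apart (`gif.Error` is not an LZW field)
    have hne := hbody.ok.gif_ne_pv
    have hfar := hbody.ok.owns.far hbody.inv.heap (a := (F.gif, 120)) (b := (F.pv, 24936)) List.mem_cons_self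
      (List.mem_cons_of_mem _ List.mem_cons_self) (by
        intro h
        exact hne (congrArg Prod.fst h))
    simp only at hfar
    apply hbody.lz.sameExcept hsV (by omega)
    intro w hw
    simp only [List.mem_cons, List.mem_nil_iff, or_false] at hw
    rcases hw with ew | ew | ew | ew | ew | ew
    all_goals
      rw [ew]
      simp only
      omega
  -- the reader did not go back
  have hrem1 : rem R s_10a2f2r.mem ≤ rem R v.mem := by
    rw [← hrem0]
    exact hback.rem
  -- THE EXIT ASSERTION: `Body` at `ret9` …
  have hbody1 : DGifGetLine.Body Gif.L.DGifGetLine.ret9 H rest frames F R n u₀ e ret s_10a2f2r := {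
    entry := hbody.entry
    pre := hbody.pre
    rip := w_rip
    rsp := w_rsp
    rbp := (w_kept.get .rbp rfl).trans hbody.rbp
    r15 := (w_kept.get .r15 rfl).trans hbody.r15
    r12 := (w_kept.get .r12 rfl).trans hbody.r12
    slot_r15 := hs15
    slot_r14 := hs14
    slot_r13 := hs13
    slot_r12 := hs12
    slot_rbp := hsbp
    slot_rbx := hsbx
    slot_ra := hsra
    inv := hinv1
    ok := hback.ok
    lz := hlz1
    rem := Nat.le_trans hrem1 hbody.rem
    same := hsame1
    code := w_code
    abi := w_inv
  }
  -- … and what is live at `ret9`: `r13d = 1`, the result in `eax`, the measure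
  refine ReachVia.done ?_
  exact {
    body := hbody1
    r13 := by
      rw [w_kept.get .r13 rfl]
      exact hr13
    res := hbool
    adv := by
      intro h1
      have h2 := (hadv h1).2
      rw [hrem0, hmeasure] at h2
      exact h2
  }

/-- **`Body` at another cut when nothing was stored**: the registers `rsp`, `rbp`, `r15`, `r12` and the memory are those of the
state `v` of the assertion; only `rip` moved. What the three arms of `gl3_seg_tail` use. -/
theorem gl3_body_carry {cut cut' : Word} {H : Heap} {rest : List Obj} {frames : List (Nat × FrameLayout)} {F : Forest} {R : Rd}
    {n : Nat} {u₀ e : State} {ret : Word} {v s : State}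
    (hb : DGifGetLine.Body cut H rest frames F R n u₀ e ret v)
    (hrip : s.rip = cut') (hrsp : s.reg .rsp = e.reg .rsp - 120) (hrbp : s.reg .rbp = v.reg .rbp)
    (hr15 : s.reg .r15 = v.reg .r15) (hr12 : s.reg .r12 = v.reg .r12) (hmem : s.mem = v.mem)
    (hcode : (conv u₀).code.In s.mem) (habi : (conv u₀).inv s) :
    DGifGetLine.Body cut' H rest frames F R n u₀ e ret s := {
  entry := hb.entry
  pre := hb.pre
  rip := hrip
  rsp := hrsp
  rbp := hrbp.trans hb.rbp
  r15 := hr15.trans hb.r15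
  r12 := hr12.trans hb.r12
  slot_r15 := by
    rw [hmem]
    exact hb.slot_r15
  slot_r14 := by
    rw [hmem]
    exact hb.slot_r14
  slot_r13 := by
    rw [hmem]
    exact hb.slot_r13
  slot_r12 := by
    rw [hmem]
    exact hb.slot_r12
  slot_rbp := by
    rw [hmem]
    exact hb.slot_rbp
  slot_rbx := by
    rw [hmem]
    exact hb.slot_rbx
  slot_ra := by
    rw [hmem]
    exact hb.slot_ra
  inv := by
    rw [hmem]
    exact hb.inv
  ok := by
    rw [hmem]
    exact hb.ok
  lz := by
    rw [hmem]
    exact hb.lz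
  rem := by
    rw [hmem]
    exact hb.rem
  same := by
    rw [hmem]
    exact hb.same
  code := hcode
  abi := habi
}

/-- **10A2F7H (ret9) … 10A2EAH | 10A28EH** (dgif_lib.c:512-518): `mov ebx, eax ; test eax, eax ; je`: GIF_ERROR goes to the epilogue
with `ebx = 0`; else `cmp [Dummy], 0 ; jne`: back to the head with the smaller measure; `Dummy = NULL`: `ebx = r13d = 1`, to the
epilogue. Nothing is stored. -/
theorem gl3_seg_tail (Lay : Layout) (hLay : Lay.hi = 0x1000000) (μ : Microarch) (hμ : UserX.MicroOK μ) (u₀ : State)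
    (hcode : HasCodeNat Lay u₀ Gif.L.DGifGetLine.entry Gif.Code.code_DGifGetLine.nat Gif.L.DGifGetLine.size)
    (H : Heap) (rest : List Obj) (frames : List (Nat × FrameLayout)) (F : Forest) (R : Rd) (n : Nat) (e : State) (ret : Word)
    (m : Nat)
    (v : State) (hat : gl3_AtRet9 m H rest frames F R n u₀ e ret v) :
    ReachVia Lay μ ProgX.Base.WayInv v (fun w =>
      (∃ m', m' < m ∧ DGifGetLine.Head m' H rest frames F R n u₀ e ret w) ∨ DGifGetLine.Done H rest frames F R n u₀ e ret w) := by
  -- THE PRELUDE: the entry assertion, as in `gl3_seg_call`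
  obtain ⟨hbody, hr13, hres, hadv⟩ := hat
  have he := hbody.entry
  v_entry he
  have w_rip := hbody.rip
  have c_rsp : v.reg .rsp = e.reg .rsp - 120 := hbody.rsp
  -- `eax` and `r13` as variables (the branch fact of `test eax, eax` speaks of the first, `ebx` gets the second)
  obtain ⟨z, c_rax⟩ : ∃ z, v.reg .rax = z := ⟨_, rfl⟩
  obtain ⟨y, c_r13⟩ : ∃ y, v.reg .r13 = y := ⟨_, rfl⟩
  rw [c_rax] at hres hadv
  rw [c_r13] at hr13
  have w_kept : RegsKept [.rsp] v v := RegsKept.refl _ _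
  have w_eq : Mem.EqOn ProgX.Base.L.textLo ProgX.Base.L.textHi u₀.mem v.mem := ProgX.Base.conv_code_eqOn hbody.code
  have hdf := (show abiInv _ from hbody.abi).1
  have hmx := (show abiInv _ from hbody.abi).2
  have hsse := ProgX.Base.sseOK_of_abiInv hbody.abi
  -- THE WALK, three arms, to the head or to the epilogue's first instruction
  u_walk hcode [hμ.vendor] until [Gif.L.DGifGetLine.at_10a2ea, Gif.L.DGifGetLine.at_10a28e] span [ProgX.Base.L.textLo, ProgX.Base.L.textHi] side (v_side)
  · -- 0x10a28e FROM 0x10a2fb: GIF_ERROR, `ebx = eax = 0`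
    have habi : (conv u₀).inv s_10a2fb := by
      refine ProgX.Base.abiInv_of ?_ ?_
      · rw [w_flags, X86.User.df_setStatus]
        exact hdf
      · rw [w_mxcsr]
        exact hmx
    have hbody1 := gl3_body_carry (cut' := Gif.L.DGifGetLine.at_10a28e) hbody w_rip w_rsp (w_kept.get .rbp rfl)
      (w_kept.get .r15 rfl) (w_kept.get .r12 rfl) w_mem (ProgX.Base.conv_code_in w_eq) habi
    refine ReachVia.done (Or.inr ?_)
    exact {
      body := hbody1
      res := by
        right
        rw [w_rbx, toNat_ofBV32, hbr_10a2fb]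
    }
  · -- 0x10a2ea FROM 0x10a303: GIF_OK and `Dummy ≠ NULL`: back to the head, the reader advanced
    have hz : z.toNat = 1 := by
      rw [toNat_part32] at hbr_10a2fb
      omega
    have habi : (conv u₀).inv s_10a303 := by
      refine ProgX.Base.abiInv_of ?_ ?_
      · rw [w_flags, X86.User.df_setStatus]
        exact hdf
      · rw [w_mxcsr]
        exact hmx
    have hbody1 := gl3_body_carry (cut' := Gif.L.DGifGetLine.at_10a2ea) hbody w_rip w_rsp (w_kept.get .rbp rfl)
      (w_kept.get .r15 rfl) (w_kept.get .r12 rfl) w_mem (ProgX.Base.conv_code_in w_eq) habi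
    refine ReachVia.done (Or.inl ⟨Gif.Spec.rem R s_10a303.mem, ?_, ?_⟩)
    · rw [w_mem]
      have h1 := hadv hz
      omega
    · exact {
        body := hbody1
        r13 := by
          rw [w_kept.get .r13 rfl, c_r13]
          exact hr13
        measure := rfl
      }
  · -- 0x10a28e FROM 0x10a308: GIF_OK and `Dummy = NULL`: `ebx = r13d = 1`
    have habi : (conv u₀).inv s_10a308 := by
      refine ProgX.Base.abiInv_of ?_ ?_
      · rw [w_flags, X86.User.df_setStatus]
        exact hdf
      · rw [w_mxcsr]
        exact hmx
    have hbody1 := gl3_body_carry (cut' := Gif.L.DGifGetLine.at_10a28e) hbody w_rip w_rsp (w_kept.get .rbp rfl)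
      (w_kept.get .r15 rfl) (w_kept.get .r12 rfl) w_mem (ProgX.Base.conv_code_in w_eq) habi
    refine ReachVia.done (Or.inr ?_)
    exact {
      body := hbody1
      res := by
        left
        rw [w_rbx, toNat_ofBV32, toNat_part32, Nat.mod_mod]
        exact hr13
    }

end Gif.Spec.DGifGetLine_3
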